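-- pv_equiv track=rewrite | github.com/JayB202/code_practice | 백준/Silver/11663. 선분 위의 점/선분 위의 점.py | count_points_in_segments
-- ===== SOURCE A (Python) =====
-- import bisect
--
-- def count_points_in_segments(points, segments):
--     # 점의 좌표를 정렬
--     points.sort()
--
--     results = []
--     for start, end in segments:
--         # 이진 탐색으로 범위 내 점의 개수 계산
--         left_index = bisect.bisect_left(points, start)
--         right_index = bisect.bisect_right(points, end)
--         results.append(right_index - left_index)
--
--     return results
-- ===== SOURCE B (Python) =====
-- def count_points_in_segments(points, segments):
--     # Offline sweep: sort the distinct thresholds, then one monotone pointer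
--     # pass over the sorted points per threshold family; answers via memo dicts.
--     points.sort()
--     lt = {}  # threshold -> number of points strictly below it
--     j = 0
--     for s in sorted(set(s for s, _ in segments)):
--         while j < len(points) and points[j] < s:
--             j += 1
--         lt[s] = j
--     le = {}  # threshold -> number of points at or below it
--     j = 0
--     for e in sorted(set(e for _, e in segments)):
--         while j < len(points) and points[j] <= e:
--             j += 1
--         le[e] = j
--     return [le[e] - lt[s] for s, e in segments]
-- ===== Notes on version B (the rewrite author's own statement) =====
-- stated objective: alternative
-- what changed: Replaces per-segment binary searches on the sorted points with an offline sweep: the distinct start/end thresholds are sorted and a single monotone pointer pass over the sorted points computes, per threshold, the count of points strictly below / at-or-below it (memoized in dicts); each answer is le[end]-lt[start].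
import Mathlib
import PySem

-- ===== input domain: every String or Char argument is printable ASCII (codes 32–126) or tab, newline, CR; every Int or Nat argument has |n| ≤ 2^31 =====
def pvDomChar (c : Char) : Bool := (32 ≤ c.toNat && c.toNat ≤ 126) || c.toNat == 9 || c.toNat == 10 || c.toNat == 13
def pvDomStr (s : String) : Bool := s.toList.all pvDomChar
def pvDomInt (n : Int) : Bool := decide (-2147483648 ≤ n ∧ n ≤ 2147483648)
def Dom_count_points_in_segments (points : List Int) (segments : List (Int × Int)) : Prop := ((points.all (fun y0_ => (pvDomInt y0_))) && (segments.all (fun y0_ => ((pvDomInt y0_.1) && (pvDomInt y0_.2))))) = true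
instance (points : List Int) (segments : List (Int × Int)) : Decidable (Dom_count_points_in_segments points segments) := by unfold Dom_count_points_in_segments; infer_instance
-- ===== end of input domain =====

-- B replaces A's per-segment binary searches with an offline sweep over sorted thresholds
-- (alternative algorithm, same cost); both sort `points` in place, so side effects agree.


-- ===== PORT A =====
def count_points_in_segments (points : List Int) (segments : List (Int × Int)) : List Int :=
  let sp := PySem.List.sorted points (fun x => x)          -- points.sort()
  segments.foldl (fun results se =>
    let left_index := PySem.List.bisectLeft sp se.1        -- bisect.bisect_left(points, start)
    let right_index := PySem.List.bisectRight sp se.2      -- bisect.bisect_right(points, end)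
    results ++ [(right_index : Int) - (left_index : Int)]) []

-- ===== PORT B =====
-- leading run of elements satisfying p (the part of the while-loop past index j)
def pvScan (p : Int → Bool) : List Int → Nat
  | [] => 0
  | x :: t => if p x then pvScan p t + 1 else 0

-- `while j < len(xs) and p(xs[j]): j += 1`  — advance j over the suffix xs[j:]
def pvAdvance (p : Int → Bool) (xs : List Int) (j : Nat) : Nat :=
  j + pvScan p (xs.drop j)

-- `for k in keys: while …: j += 1; d[k] = j` — one monotone pointer pass
def pvSweep (p : Int → Int → Bool) (xs : List Int) :
    List Int → Nat → PySem.Dict Int Nat → PySem.Dict Int Nat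
  | [], _, d => d
  | k :: rest, j, d =>
      let j' := pvAdvance (p k) xs j
      pvSweep p xs rest j' (d.insert k j')

def count_points_in_segments_alt (points : List Int) (segments : List (Int × Int)) : List Int :=
  let sp := PySem.List.sorted points (fun x => x)          -- points.sort()
  let lt := pvSweep (fun s x => decide (x < s)) sp
      (PySem.List.sorted (PySem.Set.ofList (segments.map Prod.fst)) (fun x => x)) 0 PySem.Dict.empty
  let le := pvSweep (fun e x => decide (x ≤ e)) sp
      (PySem.List.sorted (PySem.Set.ofList (segments.map Prod.snd)) (fun x => x)) 0 PySem.Dict.empty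
  segments.map (fun se => (le.getD se.2 0 : Int) - (lt.getD se.1 0 : Int))

-- ===== PRECONDITION & SPEC =====
def Spec_count_points_in_segments (points : List Int) (segments : List (Int × Int)) (out : List Int) : Prop := out = count_points_in_segments_alt points segments
instance (points : List Int) (segments : List (Int × Int)) (out : List Int) : Decidable (Spec_count_points_in_segments points segments out) := by unfold Spec_count_points_in_segments; infer_instance

-- ===== CLAIM (what is proved, stated in full; the proofs are below) =====
def Claim_equal_count_points_in_segments : Prop := ∀ (points : List Int) (segments : List (Int × Int)), Dom_count_points_in_segments points segments → Spec_count_points_in_segments points segments (count_points_in_segments points segments)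

-- ===== LEMMAS AND PROOFS =====

-- "n is the length of the longest p-prefix of xs" as a two-sided characterization
def pvChar (p : Int → Bool) (xs : List Int) (n : Nat) : Prop :=
  n ≤ xs.length ∧ (∀ j (hj : j < xs.length), j < n → p xs[j] = true) ∧
    (∀ j (hj : j < xs.length), n ≤ j → ¬ p xs[j] = true)

theorem pvChar_unique {p : Int → Bool} {xs : List Int} {n m : Nat}
    (hn : pvChar p xs n) (hm : pvChar p xs m) : n = m := by
  rcases hn with ⟨hn1, hn2, hn3⟩
  rcases hm with ⟨hm1, hm2, hm3⟩
  rcases Nat.lt_trichotomy n m with h | h | h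
  · exact absurd (hm2 n (h.trans_le hm1) h) (hn3 n (h.trans_le hm1) le_rfl)
  · exact h
  · exact absurd (hn2 m (h.trans_le hn1) h) (hm3 m (h.trans_le hn1) le_rfl)

theorem pvScan_char {p : Int → Bool}
    (hdc : ∀ a b : Int, a ≤ b → p b = true → p a = true) :
    ∀ (xs : List Int), xs.Pairwise (· ≤ ·) → pvChar p xs (pvScan p xs) := by
  intro xs
  induction xs with
  | nil =>
    intro _
    refine ⟨Nat.le_refl _, ?_, ?_⟩ <;> · intro j hj; simp at hj
  | cons x t ih =>
    intro hs
    obtain ⟨hx, ht⟩ := List.pairwise_cons.mp hs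
    obtain ⟨h1, h2, h3⟩ := ih ht
    by_cases hpx : p x = true
    · refine ⟨?_, ?_, ?_⟩
      · simp only [pvScan, hpx, if_pos, List.length_cons]; omega
      · intro j hj hlt
        simp only [pvScan, hpx, if_pos] at hlt
        match j with
        | 0 => exact hpx
        | j' + 1 =>
          simp only [List.getElem_cons_succ]
          exact h2 j' (by simpa using hj) (by omega)
      · intro j hj hge
        simp only [pvScan, hpx, if_pos] at hge
        match j with
        | 0 => omega
        | j' + 1 =>
          simp only [List.getElem_cons_succ]
          exact h3 j' (by simpa using hj) (by omega)
    · refine ⟨?_, ?_, ?_⟩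
      · simp [pvScan, hpx]
      · intro j hj hlt; simp [pvScan, hpx] at hlt
      · intro j hj _
        match j with
        | 0 => exact hpx
        | j' + 1 =>
          have hj' : j' < t.length := by simpa using hj
          simp only [List.getElem_cons_succ]
          intro hp
          exact hpx (hdc x (t[j']'hj') (hx (t[j']'hj') (List.getElem_mem _)) hp)

theorem pvAdvance_char {p : Int → Bool} {xs : List Int} {j : Nat}
    (hdc : ∀ a b : Int, a ≤ b → p b = true → p a = true)
    (hs : xs.Pairwise (· ≤ ·)) (hj : j ≤ xs.length)
    (hpre : ∀ k (hk : k < xs.length), k < j → p xs[k] = true) :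
    pvChar p xs (pvAdvance p xs j) := by
  obtain ⟨h1, h2, h3⟩ :=
    pvScan_char hdc (xs.drop j) (List.Pairwise.sublist (List.drop_sublist j xs) hs)
  rw [List.length_drop] at h1
  refine ⟨by unfold pvAdvance; omega, ?_, ?_⟩
  · intro k hk hlt
    by_cases hkj : k < j
    · exact hpre k hk hkj
    · obtain ⟨m, rfl⟩ : ∃ m, k = j + m := ⟨k - j, by omega⟩
      have hm : m < (xs.drop j).length := by rw [List.length_drop]; omega
      have := h2 m hm (by unfold pvAdvance at hlt; omega)
      rwa [List.getElem_drop] at this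
  · intro k hk hge
    unfold pvAdvance at hge
    obtain ⟨m, rfl⟩ : ∃ m, k = j + m := ⟨k - j, by omega⟩
    have hm : m < (xs.drop j).length := by rw [List.length_drop]; omega
    have := h3 m hm (by omega)
    rwa [List.getElem_drop] at this

theorem pvSweep_get?_not_mem {p : Int → Int → Bool} {xs : List Int} :
    ∀ (keys : List Int) (j : Nat) (d : PySem.Dict Int Nat) (k : Int), k ∉ keys →
      (pvSweep p xs keys j d).get? k = d.get? k := by
  intro keys
  induction keys with
  | nil => intro _ _ _ _; rfl
  | cons k0 rest ih =>
    intro j d k hk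
    simp only [pvSweep]
    rw [ih _ _ k (by intro h; exact hk (List.mem_cons_of_mem _ h))]
    exact PySem.Dict.get?_insert_of_ne _ _ (by intro h; exact hk (h ▸ List.mem_cons_self))

theorem pvSweep_get {p : Int → Int → Bool} {xs : List Int}
    (hdc : ∀ k a b : Int, a ≤ b → p k b = true → p k a = true)
    (hmono : ∀ k k' x : Int, k ≤ k' → p k x = true → p k' x = true)
    (hs : xs.Pairwise (· ≤ ·)) :
    ∀ (keys : List Int), keys.Pairwise (· ≤ ·) → keys.Nodup →
      ∀ (j : Nat) (d : PySem.Dict Int Nat), j ≤ xs.length →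
      (∀ k ∈ keys, ∀ i (hi : i < xs.length), i < j → p k xs[i] = true) →
      ∀ k ∈ keys, ∃ n, (pvSweep p xs keys j d).get? k = some n ∧ pvChar (p k) xs n := by
  intro keys
  induction keys with
  | nil => intro _ _ _ _ _ _ k hk; exact absurd hk (List.not_mem_nil)
  | cons k0 rest ih =>
    intro hpw hnd j d hj hpre k hk
    obtain ⟨hk0, hrest⟩ := List.pairwise_cons.mp hpw
    have hchar : pvChar (p k0) xs (pvAdvance (p k0) xs j) :=
      pvAdvance_char (hdc k0) hs hj
        (fun i hi hij => hpre k0 List.mem_cons_self i hi hij)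
    have hc1 := hchar.1
    have hc2 := hchar.2.1
    simp only [pvSweep]
    rcases List.mem_cons.mp hk with rfl | hkr
    · refine ⟨pvAdvance (p k) xs j, ?_, hchar⟩
      rw [pvSweep_get?_not_mem rest _ _ k (List.nodup_cons.mp hnd).1]
      exact PySem.Dict.get?_insert_self _ _ _
    · exact ih hrest (List.nodup_cons.mp hnd).2 (pvAdvance (p k0) xs j) _ hc1
        (fun k' hk' i hi hij => hmono k0 k' xs[i] (hk0 k' hk') (hc2 i hi hij))
        k hkr

theorem pv_foldl_append {α β : Type} (f : α → β) :
    ∀ (l : List α) (acc : List β),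
      l.foldl (fun r x => r ++ [f x]) acc = acc ++ l.map f := by
  intro l
  induction l with
  | nil => intro acc; simp
  | cons x t ih => intro acc; simp [List.foldl_cons, ih, List.append_assoc]

theorem pv_bisectLeft_char (xs : List Int) (x : Int) (hs : xs.Pairwise (· ≤ ·)) :
    pvChar (fun y => decide (y < x)) xs (PySem.List.bisectLeft xs x) := by
  obtain ⟨h1, h2, h3⟩ := PySem.List.bisectLeft_spec xs x hs
  refine ⟨h1, fun j hj hlt => by simpa using h2 j hj hlt,
    fun j hj hge => by simpa using h3 j hj hge⟩

theorem pv_bisectRight_char (xs : List Int) (x : Int) (hs : xs.Pairwise (· ≤ ·)) :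
    pvChar (fun y => decide (y ≤ x)) xs (PySem.List.bisectRight xs x) := by
  obtain ⟨h1, h2, h3⟩ := PySem.List.bisectRight_spec xs x hs
  refine ⟨h1, fun j hj hlt => by simpa using h2 j hj hlt,
    fun j hj hge => by simp only [decide_eq_true_eq, not_le]; exact h3 j hj hge⟩

-- ===== VERDICT (by name: the statement is the Claim_ definition above) =====
theorem count_points_in_segments_spec : Claim_equal_count_points_in_segments := by
  intro points segments _
  unfold Spec_count_points_in_segments count_points_in_segments count_points_in_segments_alt
  rw [pv_foldl_append]
  simp only [List.nil_append]
  apply List.map_congr_left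
  intro se hse
  have hsp : (PySem.List.sorted points (fun x => x)).Pairwise (· ≤ ·) :=
    PySem.List.sorted_pairwise points (fun x => x)
  -- the start-threshold dict
  have hltpw : (PySem.List.sorted (PySem.Set.ofList (segments.map Prod.fst)) (fun x => x)).Pairwise (· ≤ ·) :=
    PySem.List.sorted_pairwise _ _
  have hltnd : (PySem.List.sorted (PySem.Set.ofList (segments.map Prod.fst)) (fun x => x)).Nodup :=
    (PySem.List.sorted_ofList_pairwise_lt _).imp ne_of_lt
  have hltmem : se.1 ∈ PySem.List.sorted (PySem.Set.ofList (segments.map Prod.fst)) (fun x => x) := by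
    rw [PySem.List.mem_sorted, PySem.Set.mem_ofList]
    exact List.mem_map.mpr ⟨se, hse, rfl⟩
  obtain ⟨nlt, hltget, hltchar⟩ :=
    pvSweep_get (p := fun s x => decide (x < s))
      (fun k a b hab hb => by simp only [decide_eq_true_eq] at *; omega)
      (fun k k' x hkk hx => by simp only [decide_eq_true_eq] at *; omega)
      hsp _ hltpw hltnd 0 PySem.Dict.empty (Nat.zero_le _)
      (fun k _ i hi h0 => absurd h0 (Nat.not_lt_zero i)) se.1 hltmem
  -- the end-threshold dict
  have hlepw : (PySem.List.sorted (PySem.Set.ofList (segments.map Prod.snd)) (fun x => x)).Pairwise (· ≤ ·) :=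
    PySem.List.sorted_pairwise _ _
  have hlend : (PySem.List.sorted (PySem.Set.ofList (segments.map Prod.snd)) (fun x => x)).Nodup :=
    (PySem.List.sorted_ofList_pairwise_lt _).imp ne_of_lt
  have hlemem : se.2 ∈ PySem.List.sorted (PySem.Set.ofList (segments.map Prod.snd)) (fun x => x) := by
    rw [PySem.List.mem_sorted, PySem.Set.mem_ofList]
    exact List.mem_map.mpr ⟨se, hse, rfl⟩
  obtain ⟨nle, hleget, hlechar⟩ :=
    pvSweep_get (p := fun e x => decide (x ≤ e))
      (fun k a b hab hb => by simp only [decide_eq_true_eq] at *; omega)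
      (fun k k' x hkk hx => by simp only [decide_eq_true_eq] at *; omega)
      hsp _ hlepw hlend 0 PySem.Dict.empty (Nat.zero_le _)
      (fun k _ i hi h0 => absurd h0 (Nat.not_lt_zero i)) se.2 hlemem
  have heqlt : PySem.List.bisectLeft (PySem.List.sorted points (fun x => x)) se.1 = nlt :=
    pvChar_unique (pv_bisectLeft_char _ _ hsp) hltchar
  have heqle : PySem.List.bisectRight (PySem.List.sorted points (fun x => x)) se.2 = nle :=
    pvChar_unique (pv_bisectRight_char _ _ hsp) hlechar
  simp [PySem.Dict.getD, hltget, hleget, heqlt, heqle]
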